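-- pv_equiv track=rewrite | github.com/farmsim/farms_core | farms_core/model/control.py | joints_from_control_types
-- ===== SOURCE A (Python) =====
-- from enum import IntEnum
--
-- class ControlType(IntEnum):
--     """Control type"""
--     POSITION = 0
--     VELOCITY = 1
--     TORQUE = 2
--     SPRINGREF = 3
--     SPRINGCOEF = 4
--     DAMPINGCOEF = 5
--     MUSCLE = 6
--
--     @staticmethod
--     def to_string(control: int) -> str:
--         """To string"""
--         return {
--             ControlType.POSITION: 'position',
--             ControlType.VELOCITY: 'velocity',
--             ControlType.TORQUE: 'torque',
--             ControlType.SPRINGREF: 'springref',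
--             ControlType.SPRINGCOEF: 'springcoef',
--             ControlType.DAMPINGCOEF: 'dampingcoef',
--             ControlType.MUSCLE: 'muscle',
--         }[control]
--
--     @staticmethod
--     def from_string(string: str) -> int:
--         """From string"""
--         return {
--             'position': ControlType.POSITION,
--             'velocity': ControlType.VELOCITY,
--             'torque': ControlType.TORQUE,
--             'springref': ControlType.SPRINGREF,
--             'springcoef': ControlType.SPRINGCOEF,
--             'dampingcoef': ControlType.DAMPINGCOEF,
--             'muscle': ControlType.MUSCLE,
--         }[string]
--
--     @staticmethod
--     def from_string_list(string_list: list[str]) -> list[int]: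
--         """From string"""
--         return [
--             ControlType.from_string(control_string)
--             for control_string in string_list
--         ]
--
-- def joints_from_control_types(
--         joints_names: list[str],
--         joints_control_types: dict[str, list[ControlType]],
-- ) -> tuple[list[str], ...]:
--     """From control types"""
--     return tuple(
--         [
--             joint
--             for joint in joints_names
--             if control_type in joints_control_types[joint]
--         ]
--         for control_type in list(ControlType)
--     )
-- ===== SOURCE B (Python) =====
-- def joints_from_control_types(joints_names, joints_control_types):
--     """From control types: one distributing pass into 7 buckets."""
--     buckets = [[] for _ in range(7)]
--     for joint in joints_names:
--         for control_type in dict.fromkeys(joints_control_types[joint]):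
--             if 0 <= control_type <= 6:
--                 buckets[int(control_type)].append(joint)
--     return tuple(buckets)
-- ===== Notes on version B (the rewrite author's own statement) =====
-- stated objective: faster
-- what changed: A rescans the whole joints list once per control type (7 membership scans of each joint's type list); B makes a single pass over the joints, distributing each joint into per-control-type buckets using its deduplicated type list.
import Mathlib
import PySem

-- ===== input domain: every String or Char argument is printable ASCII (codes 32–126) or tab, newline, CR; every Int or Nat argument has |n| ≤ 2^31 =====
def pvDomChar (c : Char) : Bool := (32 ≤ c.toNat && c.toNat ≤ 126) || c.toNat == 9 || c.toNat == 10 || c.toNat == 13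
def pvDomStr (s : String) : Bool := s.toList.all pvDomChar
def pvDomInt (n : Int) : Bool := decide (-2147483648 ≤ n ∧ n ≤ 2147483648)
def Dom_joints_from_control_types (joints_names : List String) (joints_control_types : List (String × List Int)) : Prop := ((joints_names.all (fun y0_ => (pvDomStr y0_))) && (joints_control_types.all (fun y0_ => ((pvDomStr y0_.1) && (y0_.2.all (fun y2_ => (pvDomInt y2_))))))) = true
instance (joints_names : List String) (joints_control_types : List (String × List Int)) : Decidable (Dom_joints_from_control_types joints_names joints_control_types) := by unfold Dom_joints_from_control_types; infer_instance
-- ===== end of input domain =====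

-- B replaces A's per-control-type rescans of the joints list by one distributing pass into 7 buckets (constant-factor speedup).

-- ===== PORT A =====
-- A: for each of the 7 control types, filter the joints whose type list contains it.
def joints_from_control_types (joints_names : List String) (joints_control_types : List (String × List Int)) : List (List String) :=
  ([0, 1, 2, 3, 4, 5, 6] : List Int).map (fun ct =>
    joints_names.filter (fun j => (PySem.Dict.getD (PySem.Dict.mk joints_control_types) j []).contains ct))

-- ===== PORT B =====
-- B: one pass over the joints, appending each joint to the bucket of every distinct valid control type it uses.
def pvBump (bs : List (List String)) (i : Nat) (j : String) : List (List String) :=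
  bs.set i (bs.getD i [] ++ [j])

def joints_from_control_types_alt (joints_names : List String) (joints_control_types : List (String × List Int)) : List (List String) :=
  joints_names.foldl (fun bs j =>
    (PySem.Set.ofList (PySem.Dict.getD (PySem.Dict.mk joints_control_types) j [])).foldl
      (fun bs ct => if 0 ≤ ct ∧ ct ≤ 6 then pvBump bs ct.toNat j else bs) bs)
    (List.replicate 7 [])

-- ===== PRECONDITION & SPEC =====
-- Pre_ excludes exactly the inputs where Python A raises KeyError: a joint name missing from the dict.
def Pre_joints_from_control_types (joints_names : List String) (joints_control_types : List (String × List Int)) : Prop :=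
  ∀ j ∈ joints_names, (PySem.Dict.get? (PySem.Dict.mk joints_control_types) j).isSome = true
instance (joints_names : List String) (joints_control_types : List (String × List Int)) : Decidable (Pre_joints_from_control_types joints_names joints_control_types) := by unfold Pre_joints_from_control_types; infer_instance
def pvWitness_joints_from_control_types : List String × (List (String × List Int)) := (["hip", "knee"], [("hip", [0, 2]), ("knee", [1])])

def Spec_joints_from_control_types (joints_names : List String) (joints_control_types : List (String × List Int)) (out : List (List String)) : Prop := out = joints_from_control_types_alt joints_names joints_control_types
instance (joints_names : List String) (joints_control_types : List (String × List Int)) (out : List (List String)) : Decidable (Spec_joints_from_control_types joints_names joints_control_types out) := by unfold Spec_joints_from_control_types; infer_instance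

-- ===== CLAIM (what is proved, stated in full; the proofs are below) =====
def Claim_equal_joints_from_control_types : Prop := ∀ (joints_names : List String) (joints_control_types : List (String × List Int)), Dom_joints_from_control_types joints_names joints_control_types → Pre_joints_from_control_types joints_names joints_control_types → Spec_joints_from_control_types joints_names joints_control_types (joints_from_control_types joints_names joints_control_types)

-- ===== LEMMAS AND PROOFS =====

-- pvBump preserves length
theorem pvBump_length (bs : List (List String)) (i : Nat) (j : String) : (pvBump bs i j).length = bs.length := by
  simp [pvBump]

-- the inner fold preserves length
theorem inner_length (j : String) (s : List Int) (bs : List (List String)) :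
    (s.foldl (fun bs ct => if 0 ≤ ct ∧ ct ≤ 6 then pvBump bs ct.toNat j else bs) bs).length = bs.length := by
  induction s generalizing bs with
  | nil => rfl
  | cons ct rest ih =>
      simp only [List.foldl_cons]
      rw [ih]
      split
      · exact pvBump_length _ _ _
      · rfl

theorem pvBump_getD (bs : List (List String)) (k i : Nat) (j : String) (hk : k < bs.length) :
    (pvBump bs k j).getD i [] = if i = k then bs.getD i [] ++ [j] else bs.getD i [] := by
  unfold pvBump
  by_cases h : i = k
  · subst h
    rw [List.getD_eq_getElem _ _ (by simpa using hk), List.getElem_set_self, if_pos rfl,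
        List.getD_eq_getElem _ _ hk]
  · rw [if_neg h]
    unfold List.getD
    rw [List.getElem?_set_ne (by omega)]

-- characterisation of the inner fold: bucket i gains [j] iff (i : Int) is in the (nodup) list s
theorem inner_getD (j : String) (s : List Int) (hs : s.Nodup) (bs : List (List String))
    (h7 : bs.length = 7) (i : Nat) (hi : i < 7) :
    (s.foldl (fun bs ct => if 0 ≤ ct ∧ ct ≤ 6 then pvBump bs ct.toNat j else bs) bs).getD i []
      = bs.getD i [] ++ (if (i : Int) ∈ s then [j] else []) := by
  induction s generalizing bs with
  | nil => simp
  | cons ct rest ih =>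
      obtain ⟨hct, hrest⟩ := List.nodup_cons.mp hs
      simp only [List.foldl_cons]
      by_cases hr : 0 ≤ ct ∧ ct ≤ 6
      · rw [if_pos hr, ih hrest _ (by rw [pvBump_length]; exact h7),
            pvBump_getD _ _ _ _ (by rw [h7]; omega)]
        by_cases heq : i = ct.toNat
        · have hic : (i : Int) = ct := by omega
          rw [if_pos heq, if_neg (by rw [hic]; exact hct), if_pos (by simp [hic]),
              List.append_nil]
        · have hic : (i : Int) ≠ ct := by omega
          rw [if_neg heq]
          congr 1
          simp [hic]
      · rw [if_neg hr]
        rw [ih hrest _ h7]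
        have hic : (i : Int) ≠ ct := by omega
        congr 1
        simp [hic]

-- outer fold preserves length
theorem outer_length (d : List (String × List Int)) (names : List String) (bs : List (List String)) :
    (names.foldl (fun bs j =>
      (PySem.Set.ofList (PySem.Dict.getD (PySem.Dict.mk d) j [])).foldl
        (fun bs ct => if 0 ≤ ct ∧ ct ≤ 6 then pvBump bs ct.toNat j else bs) bs) bs).length = bs.length := by
  induction names generalizing bs with
  | nil => rfl
  | cons j rest ih => simp only [List.foldl_cons]; rw [ih, inner_length]

-- characterisation of the outer fold: bucket i = the joints whose type list contains (i : Int)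
theorem outer_getD (d : List (String × List Int)) (names : List String) (bs : List (List String))
    (h7 : bs.length = 7) (i : Nat) (hi : i < 7) :
    (names.foldl (fun bs j =>
      (PySem.Set.ofList (PySem.Dict.getD (PySem.Dict.mk d) j [])).foldl
        (fun bs ct => if 0 ≤ ct ∧ ct ≤ 6 then pvBump bs ct.toNat j else bs) bs) bs).getD i []
      = bs.getD i [] ++ names.filter (fun j => (PySem.Dict.getD (PySem.Dict.mk d) j []).contains (i : Int)) := by
  induction names generalizing bs with
  | nil => simp
  | cons j rest ih =>
      simp only [List.foldl_cons]
      rw [ih _ (by rw [inner_length]; exact h7),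
          inner_getD j _ (PySem.Set.nodup_ofList _) bs h7 i hi]
      rw [List.filter_cons]
      have : ((i : Int) ∈ PySem.Set.ofList (PySem.Dict.getD (PySem.Dict.mk d) j []))
          ↔ ((PySem.Dict.getD (PySem.Dict.mk d) j []).contains (i : Int) = true) := by
        rw [PySem.Set.mem_ofList]; simp
      by_cases hm : (PySem.Dict.getD (PySem.Dict.mk d) j []).contains (i : Int) = true
      · rw [if_pos (this.mpr hm), hm]
        simp [List.append_assoc]
      · rw [if_neg (fun h => hm (this.mp h))]
        simp only [Bool.not_eq_true] at hm
        rw [hm]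
        simp

-- ===== VERDICT (by name: the statement is the Claim_ definition above) =====
theorem joints_from_control_types_spec : Claim_equal_joints_from_control_types := by
  intro names d _dom _pre
  unfold Spec_joints_from_control_types joints_from_control_types joints_from_control_types_alt
  apply List.ext_getElem
  · rw [outer_length]; rfl
  · intro i hi hi'
    have hi7 : i < 7 := by simpa using hi
    rw [← List.getD_eq_getElem _ [] hi']
    rw [outer_getD d names _ (by simp) i hi7]
    simp only [List.getD, List.getElem?_replicate, if_pos hi7, Option.getD_some, List.nil_append]
    interval_cases i <;> simp
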